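-- pv_equiv track=rewrite | github.com/FahadMajed/DSND | P2/Rearrange Array Digits/rearrange_array_digits.py | get_two_numbers_from_array
-- ===== SOURCE A (Python) =====
-- def get_two_numbers_from_array(arr):
--
--     num1, num2 = 0, 0
--     for i, digit in enumerate(arr):
--         if i % 2 == 0:
--             # multiplying by 10 to shift all the digits one place left
--             num1 = num1 * 10 + digit
--         else:
--             num2 = num2 * 10 + digit
--     return num1, num2
-- ===== SOURCE B (Python) =====
-- def get_two_numbers_from_array(arr):
--     # Build both numbers back-to-front: walk the reversed array keeping two
--     # (value, place) accumulators whose roles swap every step, adding each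
--     # digit with its explicit place value instead of Horner shifts.
--     u, pu, v, pv = 0, 1, 0, 1
--     for d in reversed(arr):
--         u, pu, v, pv = v, pv, u + d * pu, pu * 10
--     return v, u
-- ===== Notes on version B (the rewrite author's own statement) =====
-- stated objective: alternative
-- what changed: B builds both numbers back-to-front from the reversed array with two explicit place-value accumulators that swap roles each step, replacing A's forward Horner acc*10+digit loop and its index-parity test entirely.
import Mathlib
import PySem

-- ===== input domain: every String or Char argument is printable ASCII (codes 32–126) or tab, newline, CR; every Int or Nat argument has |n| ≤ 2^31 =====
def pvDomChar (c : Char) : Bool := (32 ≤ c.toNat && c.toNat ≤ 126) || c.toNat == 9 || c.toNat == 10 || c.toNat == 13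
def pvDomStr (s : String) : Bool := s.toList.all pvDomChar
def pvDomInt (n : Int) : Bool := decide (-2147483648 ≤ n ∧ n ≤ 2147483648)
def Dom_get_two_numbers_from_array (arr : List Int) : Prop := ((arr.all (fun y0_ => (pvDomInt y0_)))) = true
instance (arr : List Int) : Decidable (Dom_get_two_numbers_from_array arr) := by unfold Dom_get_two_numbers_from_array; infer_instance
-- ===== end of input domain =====

-- B builds both numbers back-to-front from the reversed array with two place-value
-- accumulators that swap roles each step, instead of A's forward Horner loop with an
-- index-parity branch (objective: alternative, same cost).


-- ===== PORT A =====
-- literal port of A: enumerate + parity branch, folding the (num1, num2) pair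
def get_two_numbers_from_array (arr : List Int) : Int × Int :=
  (PySem.List.enumerate arr).foldl
    (fun (p : Int × Int) (id : Int × Int) =>
      if PySem.Int.mod id.1 2 = 0 then (p.1 * 10 + id.2, p.2)
      else (p.1, p.2 * 10 + id.2))
    (0, 0)

-- ===== PORT B =====
-- port of B: fold over the reversed list with state (u, pu, v, pv); each step adds
-- the digit with its place value into one slot and swaps the two (value, place) pairs
def get_two_numbers_from_array_alt (arr : List Int) : Int × Int :=
  let s := arr.reverse.foldl
    (fun (st : Int × Int × Int × Int) (d : Int) =>
      (st.2.2.1, st.2.2.2, st.1 + d * st.2.1, st.2.1 * 10))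
    (0, 1, 0, 1)
  (s.2.2.1, s.1)

-- ===== PRECONDITION & SPEC =====
def Spec_get_two_numbers_from_array (arr : List Int) (out : Int × Int) : Prop := out = get_two_numbers_from_array_alt arr
instance (arr : List Int) (out : Int × Int) : Decidable (Spec_get_two_numbers_from_array arr out) := by unfold Spec_get_two_numbers_from_array; infer_instance

-- ===== CLAIM (what is proved, stated in full; the proofs are below) =====
def Claim_equal_get_two_numbers_from_array : Prop := ∀ (arr : List Int), Dom_get_two_numbers_from_array arr → Spec_get_two_numbers_from_array arr (get_two_numbers_from_array arr)

-- ===== LEMMAS AND PROOFS =====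

-- reference characterisation: (even-index number, odd-index number) by head recursion
def pvSpecN : List Int → Int × Int
  | [] => (0, 0)
  | d :: rest => (d * (10 : Int) ^ (rest.length / 2) + (pvSpecN rest).2, (pvSpecN rest).1)

-- A's fold, from any start index s ≥ 0, in terms of pvSpecN and place values
theorem pv_foldA : ∀ (xs : List Int) (s : Int), 0 ≤ s → ∀ (n1 n2 : Int),
    (PySem.List.enumerate xs s).foldl
      (fun (p : Int × Int) (id : Int × Int) =>
        if PySem.Int.mod id.1 2 = 0 then (p.1 * 10 + id.2, p.2)
        else (p.1, p.2 * 10 + id.2))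
      (n1, n2)
    = if PySem.Int.mod s 2 = 0 then
        (n1 * 10 ^ ((xs.length + 1) / 2) + (pvSpecN xs).1,
         n2 * 10 ^ (xs.length / 2) + (pvSpecN xs).2)
      else
        (n1 * 10 ^ (xs.length / 2) + (pvSpecN xs).2,
         n2 * 10 ^ ((xs.length + 1) / 2) + (pvSpecN xs).1)
  | [], s, hs, n1, n2 => by
      simp [PySem.List.enumerate_nil, pvSpecN]
  | d :: rest, s, hs, n1, n2 => by
      simp only [PySem.List.enumerate_cons, List.foldl_cons]
      by_cases he : PySem.Int.mod s 2 = 0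
      · have h1 : ¬ PySem.Int.mod (s + 1) 2 = 0 := by
          simp [PySem.Int.mod, Int.fmod_eq_emod] at he ⊢; omega
        rw [if_pos he, if_pos he,
            pv_foldA rest (s + 1) (by omega) (n1 * 10 + d) n2, if_neg h1]
        simp only [pvSpecN, List.length_cons]
        have h2 : (rest.length + 1 + 1) / 2 = rest.length / 2 + 1 := by omega
        rw [h2, pow_succ]
        simp only [Prod.mk.injEq]
        and_intros <;> first | trivial | ring
      · have h1 : PySem.Int.mod (s + 1) 2 = 0 := by
          simp [PySem.Int.mod, Int.fmod_eq_emod] at he ⊢; omega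
        rw [if_neg he, if_neg he,
            pv_foldA rest (s + 1) (by omega) n1 (n2 * 10 + d), if_pos h1]
        simp only [pvSpecN, List.length_cons]
        have h2 : (rest.length + 1 + 1) / 2 = rest.length / 2 + 1 := by omega
        rw [h2, pow_succ]
        simp only [Prod.mk.injEq]
        and_intros <;> first | trivial | ring

-- B's fold over the reversed list, in terms of pvSpecN and place values
theorem pv_foldB : ∀ (xs : List Int),
    xs.reverse.foldl
      (fun (st : Int × Int × Int × Int) (d : Int) =>
        (st.2.2.1, st.2.2.2, st.1 + d * st.2.1, st.2.1 * 10))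
      (0, 1, 0, 1)
    = ((pvSpecN xs).2, 10 ^ (xs.length / 2),
       (pvSpecN xs).1, 10 ^ ((xs.length + 1) / 2)) := by
  intro xs
  rw [List.foldl_reverse]
  induction xs with
  | nil => simp [pvSpecN]
  | cons d rest ih =>
      simp only [List.foldr_cons, ih, pvSpecN, List.length_cons]
      have h2 : (rest.length + 1 + 1) / 2 = rest.length / 2 + 1 := by omega
      rw [h2, pow_succ]
      simp only [Prod.mk.injEq]
      and_intros <;> first | trivial | ring

-- ===== VERDICT (by name: the statement is the Claim_ definition above) =====
theorem get_two_numbers_from_array_spec : Claim_equal_get_two_numbers_from_array := by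
  intro arr _
  unfold Spec_get_two_numbers_from_array get_two_numbers_from_array get_two_numbers_from_array_alt
  rw [pv_foldA arr 0 (by decide) 0 0, pv_foldB arr]
  simp
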